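-- pv_equiv track=rewrite | github.com/rrav594/DSANotes | dsa-notes/2.advance-dsa/heap/6.merge-two-binary-max-heaps.py | mergeHeaps
-- ===== SOURCE A (Python) =====
-- import heapq
--
-- def mergeHeaps(a, b, n, m):
--     heap = []
--     heap[:] = a+b
--     heapq.heapify(heap)
--     res = []
--     while heap:
--         res.append(heapq.heappop(heap))
--     return res[::-1]
-- ===== SOURCE B (Python) =====
-- def mergeHeaps(a, b, n, m):
--     return sorted(a + b, reverse=True)
-- ===== Notes on version B (the rewrite author's own statement) =====
-- stated objective: simpler
-- what changed: Replaces the build-a-min-heap / repeatedly-heappop-then-reverse loop with a single closed-form sorted(a+b, reverse=True).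
import Mathlib
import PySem

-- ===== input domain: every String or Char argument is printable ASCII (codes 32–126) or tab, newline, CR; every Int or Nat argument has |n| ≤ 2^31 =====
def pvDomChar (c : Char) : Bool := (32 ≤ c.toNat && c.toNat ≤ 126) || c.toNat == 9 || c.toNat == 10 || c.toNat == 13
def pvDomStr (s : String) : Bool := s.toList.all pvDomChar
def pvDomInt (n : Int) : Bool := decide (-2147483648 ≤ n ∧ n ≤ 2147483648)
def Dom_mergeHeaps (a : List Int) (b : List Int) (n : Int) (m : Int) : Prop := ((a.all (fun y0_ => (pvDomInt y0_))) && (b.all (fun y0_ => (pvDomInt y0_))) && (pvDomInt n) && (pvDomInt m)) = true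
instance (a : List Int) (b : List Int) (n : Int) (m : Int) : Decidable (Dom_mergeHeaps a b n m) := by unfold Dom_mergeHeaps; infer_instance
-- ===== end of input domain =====

-- B replaces A's build-a-min-heap / pop-all-then-reverse loop with one closed-form
-- sorted(a+b, reverse=True); same result, simpler code (objective: simpler).


-- ===== PORT A =====
-- heapq is ported by hand via its contract on a list of Ints, which is value-exact here:
-- heapq.heapify permutes the list in place (contents unchanged), and each heapq.heappop
-- removes and returns a smallest element; since the elements are Ints (equal elements are
-- indistinguishable), the popped sequence — the only thing A observes — is exactly the
-- sequence of minima of the remaining multiset.  popMinA removes the first occurrence of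
-- the minimum and returns it together with the rest.
def popMinA (h : List Int) : Option (Int × List Int) :=
  match h with
  | [] => none
  | x :: t =>
    match popMinA t with
    | none => some (x, [])
    | some (m, r) => if x ≤ m then some (x, t) else some (m, x :: r)

theorem popMinA_cons_eq (x : Int) (t : List Int) :
    popMinA (x :: t) = match popMinA t with
      | none => some (x, [])
      | some (m, r) => if x ≤ m then some (x, t) else some (m, x :: r) := rfl

theorem popMinA_cons_ne_none (x : Int) (t : List Int) : popMinA (x :: t) ≠ none := by
  rw [popMinA_cons_eq]
  split
  · simp
  · split <;> simp

theorem popMinA_length : ∀ (h : List Int) (m : Int) (r : List Int),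
    popMinA h = some (m, r) → r.length + 1 = h.length := by
  intro h
  induction h with
  | nil => intro m r hc; simp [popMinA] at hc
  | cons x t ih =>
    intro m r hc
    rw [popMinA_cons_eq] at hc
    cases he : popMinA t with
    | none =>
      rw [he] at hc
      dsimp only at hc
      cases t with
      | nil => simp only [Option.some.injEq, Prod.mk.injEq] at hc; obtain ⟨h1, h2⟩ := hc; subst h1 h2; rfl
      | cons y s => exact absurd he (popMinA_cons_ne_none y s)
    | some p =>
      obtain ⟨m', r'⟩ := p
      rw [he] at hc
      dsimp only at hc
      have hlen := ih m' r' he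
      split at hc <;> simp only [Option.some.injEq, Prod.mk.injEq] at hc <;> obtain ⟨h1, h2⟩ := hc <;> subst h1 h2 <;> simp <;> omega

-- the while-pop loop: res.append(heappop(heap)) until the heap is empty, then res[::-1]
def popLoopA (h : List Int) (res : List Int) : List Int :=
  match hp : popMinA h with
  | none => res.reverse
  | some (m, r) => popLoopA r (res ++ [m])
termination_by h.length
decreasing_by have := popMinA_length h m r hp; omega

def mergeHeaps (a : List Int) (b : List Int) (n : Int) (m : Int) : List Int :=
  let heap := a ++ b       -- heap[:] = a+b; heapq.heapify(heap) rearranges, contents unchanged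
  popLoopA heap []

-- ===== PORT B =====
def mergeHeaps_alt (a : List Int) (b : List Int) (n : Int) (m : Int) : List Int :=
  PySem.List.sorted (a ++ b) (fun x => x) true

-- ===== PRECONDITION & SPEC =====
def Spec_mergeHeaps (a : List Int) (b : List Int) (n : Int) (m : Int) (out : List Int) : Prop := out = mergeHeaps_alt a b n m
instance (a : List Int) (b : List Int) (n : Int) (m : Int) (out : List Int) : Decidable (Spec_mergeHeaps a b n m out) := by unfold Spec_mergeHeaps; infer_instance

-- ===== CLAIM (what is proved, stated in full; the proofs are below) =====
def Claim_equal_mergeHeaps : Prop := ∀ (a : List Int) (b : List Int) (n : Int) (m : Int), Dom_mergeHeaps a b n m → Spec_mergeHeaps a b n m (mergeHeaps a b n m)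

-- ===== LEMMAS AND PROOFS =====

theorem popMinA_perm : ∀ (h : List Int) (m : Int) (r : List Int),
    popMinA h = some (m, r) → (m :: r).Perm h := by
  intro h
  induction h with
  | nil => intro m r hc; simp [popMinA] at hc
  | cons x t ih =>
    intro m r hc
    rw [popMinA_cons_eq] at hc
    cases he : popMinA t with
    | none =>
      rw [he] at hc
      dsimp only at hc
      cases t with
      | nil => simp only [Option.some.injEq, Prod.mk.injEq] at hc; obtain ⟨h1, h2⟩ := hc; subst h1 h2; rfl
      | cons y s => exact absurd he (popMinA_cons_ne_none y s)
    | some p =>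
      obtain ⟨m', r'⟩ := p
      rw [he] at hc
      dsimp only at hc
      have hperm := ih m' r' he
      split at hc <;> simp only [Option.some.injEq, Prod.mk.injEq] at hc <;> obtain ⟨h1, h2⟩ := hc <;> subst h1 h2
      · exact List.Perm.refl _
      · exact List.Perm.trans (List.Perm.swap x m' r') (List.Perm.cons x hperm)

theorem popMinA_min : ∀ (h : List Int) (m : Int) (r : List Int),
    popMinA h = some (m, r) → ∀ y ∈ h, m ≤ y := by
  intro h
  induction h with
  | nil => intro m r hc; simp [popMinA] at hc
  | cons x t ih =>
    intro m r hc y hy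
    rw [popMinA_cons_eq] at hc
    cases he : popMinA t with
    | none =>
      rw [he] at hc
      dsimp only at hc
      cases t with
      | nil =>
        simp only [Option.some.injEq, Prod.mk.injEq] at hc; obtain ⟨h1, _⟩ := hc; subst h1
        simp at hy; omega
      | cons z s => exact absurd he (popMinA_cons_ne_none z s)
    | some p =>
      obtain ⟨m', r'⟩ := p
      rw [he] at hc
      dsimp only at hc
      have hmin := ih m' r' he
      split at hc <;> simp only [Option.some.injEq, Prod.mk.injEq] at hc <;> obtain ⟨h1, _⟩ := hc <;> subst h1 <;>
        rcases List.mem_cons.mp hy with hm | hm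
      · omega
      · exact le_trans (by assumption) (hmin y hm)
      · subst hm; omega
      · exact hmin y hm

-- the sequence of popped minima, without the accumulator
def popsA (h : List Int) : List Int :=
  match hp : popMinA h with
  | none => []
  | some (m, r) => m :: popsA r
termination_by h.length
decreasing_by have := popMinA_length h m r hp; omega

theorem popsA_none (h : List Int) (hp : popMinA h = none) : popsA h = [] := by
  rw [popsA.eq_def]; split <;> simp_all

theorem popsA_some (h : List Int) (m : Int) (r : List Int) (hp : popMinA h = some (m, r)) :
    popsA h = m :: popsA r := by
  rw [popsA.eq_def]; split <;> simp_all

theorem popLoopA_eq_popsA : ∀ (h res : List Int), popLoopA h res = (res ++ popsA h).reverse := by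
  intro h
  induction h using popsA.induct with
  | case1 h hp =>
    intro res
    rw [popLoopA.eq_def, popsA_none h hp]
    split <;> simp_all
  | case2 h m r hp ih =>
    intro res
    rw [popLoopA.eq_def, popsA_some h m r hp]
    split
    · simp_all
    · rename_i m' r' hp'
      rw [hp] at hp'; simp at hp'; obtain ⟨h1, h2⟩ := hp'; subst h1 h2
      rw [ih]; simp

theorem popsA_perm : ∀ (h : List Int), (popsA h).Perm h := by
  intro h
  induction h using popsA.induct with
  | case1 h hp =>
    rw [popsA_none h hp]
    cases h with
    | nil => rfl
    | cons x t => exact absurd hp (popMinA_cons_ne_none x t)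
  | case2 h m r hp ih =>
    rw [popsA_some h m r hp]
    exact (List.Perm.cons m ih).trans (popMinA_perm h m r hp)

theorem popsA_sorted : ∀ (h : List Int), (popsA h).Pairwise (· ≤ ·) := by
  intro h
  induction h using popsA.induct with
  | case1 h hp => rw [popsA_none h hp]; exact List.Pairwise.nil
  | case2 h m r hp ih =>
    rw [popsA_some h m r hp]
    refine List.Pairwise.cons ?_ ih
    intro y hy
    have hyr : y ∈ r := (popsA_perm r).mem_iff.mp hy
    have : y ∈ h := ((popMinA_perm h m r hp).mem_iff).mp (List.mem_cons_of_mem m hyr)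
    exact popMinA_min h m r hp y this

-- ===== VERDICT (by name: the statement is the Claim_ definition above) =====
theorem mergeHeaps_spec : Claim_equal_mergeHeaps := by
  intro a b n m _
  unfold Spec_mergeHeaps mergeHeaps mergeHeaps_alt
  simp only
  rw [popLoopA_eq_popsA, List.nil_append]
  refine PySem.List.eq_of_perm_of_pairwise_le_of_injective (fun x : Int => -x) neg_injective ?_ ?_ ?_
  · exact ((popsA (a ++ b)).reverse_perm.trans (popsA_perm (a ++ b))).trans
      (PySem.List.sorted_perm (a ++ b) (fun x => x) true).symm
  · rw [List.pairwise_reverse]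
    exact (popsA_sorted (a ++ b)).imp (by intro x y h; dsimp only; omega)
  · exact (PySem.List.sorted_pairwise_rev (a ++ b) (fun x => x)).imp
      (by intro x y h; dsimp only at h ⊢; omega)
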